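-- pv_equiv track=rewrite | github.com/coganlab/IEEG_Pipelines | Python/PreProcess/filter.py | next_fast_len
-- ===== SOURCE A (Python) =====
-- def next_fast_len(target):
--     """Find the next fast size of input data to `fft`, for zero-padding, etc.
--     SciPy's FFTPACK has efficient functions for radix {2, 3, 4, 5}, so this
--     returns the next composite of the prime factors 2, 3, and 5 which is
--     greater than or equal to `target`. (These are also known as 5-smooth
--     numbers, regular numbers, or Hamming numbers.)
--     Parameters
--     ----------
--     target : int
--         Length to start searching from.  Must be a positive integer.
--     Returns
--     -------
--     out : int
--         The first 5-smooth number greater than or equal to `target`.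
--     Notes
--     -----
--     Copied from SciPy with minor modifications.
--     """
--     from bisect import bisect_left
--     hams = (8, 9, 10, 12, 15, 16, 18, 20, 24, 25, 27, 30, 32, 36, 40, 45, 48,
--             50, 54, 60, 64, 72, 75, 80, 81, 90, 96, 100, 108, 120, 125, 128,
--             135, 144, 150, 160, 162, 180, 192, 200, 216, 225, 240, 243, 250,
--             256, 270, 288, 300, 320, 324, 360, 375, 384, 400, 405, 432, 450,
--             480, 486, 500, 512, 540, 576, 600, 625, 640, 648, 675, 720, 729,
--             750, 768, 800, 810, 864, 900, 960, 972, 1000, 1024, 1080, 1125,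
--             1152, 1200, 1215, 1250, 1280, 1296, 1350, 1440, 1458, 1500, 1536,
--             1600, 1620, 1728, 1800, 1875, 1920, 1944, 2000, 2025, 2048, 2160,
--             2187, 2250, 2304, 2400, 2430, 2500, 2560, 2592, 2700, 2880, 2916,
--             3000, 3072, 3125, 3200, 3240, 3375, 3456, 3600, 3645, 3750, 3840,
--             3888, 4000, 4050, 4096, 4320, 4374, 4500, 4608, 4800, 4860, 5000,
--             5120, 5184, 5400, 5625, 5760, 5832, 6000, 6075, 6144, 6250, 6400,
--             6480, 6561, 6750, 6912, 7200, 7290, 7500, 7680, 7776, 8000, 8100,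
--             8192, 8640, 8748, 9000, 9216, 9375, 9600, 9720, 10000)
--
--     if target <= 6:
--         return target
--
--     # Quickly check if it's already a power of 2
--     if not (target & (target - 1)):
--         return target
--
--     # Get result quickly for small sizes, since FFT itself is similarly fast.
--     if target <= hams[-1]:
--         return hams[bisect_left(hams, target)]
--
--     match = float('inf')  # Anything found will be smaller
--     p5 = 1
--     while p5 < target:
--         p35 = p5
--         while p35 < target:
--             # Ceiling integer division, avoiding conversion to float
--             # (quotient = ceil(target / p35))
--             quotient = -(-target // p35)
--
--             p2 = 2 ** int(quotient - 1).bit_length()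
--
--             N = p2 * p35
--             if N == target:
--                 return N
--             elif N < match:
--                 match = N
--             p35 *= 3
--             if p35 == target:
--                 return p35
--         if p35 < match:
--             match = p35
--         p5 *= 5
--         if p5 == target:
--             return p5
--     if p5 < match:
--         match = p5
--     return match
-- ===== SOURCE B (Python) =====
-- # Alternative exact re-implementation: generate-and-filter over an explicit
-- # power-of-two bound instead of table lookup + on-demand minimal exponents.
-- def _powers(p, bound):
--     """All powers of p (1, p, p^2, ...) that are <= bound."""
--     out = []
--     x = 1
--     while x <= bound:
--         out.append(x)
--         x *= p
--     return out
--
--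
-- def _smooth_upto(bound):
--     """All 5-smooth numbers <= bound."""
--     return [p5 * p3 * p2
--             for p5 in _powers(5, bound)
--             for p3 in _powers(3, bound // p5)
--             for p2 in _powers(2, bound // (p5 * p3))]
--
--
-- def next_fast_len(target):
--     if target <= 6:
--         return target
--     bound = 1
--     while bound < target:
--         bound *= 2
--     return min(n for n in _smooth_upto(bound) if n >= target)
-- ===== Notes on version B (the rewrite author's own statement) =====
-- stated objective: alternative
-- what changed: Replaces the lookup table with bisect, the power-of-two bit trick and the nested while loops computing a minimal 2-exponent per 3^j*5^k via ceil-division and bit_length, by a generate-and-filter scheme: compute a power-of-two bound >= target, enumerate every 5-smooth number up to that bound with a comprehension over three power lists, and return the minimum of those >= target.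
import Mathlib
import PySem

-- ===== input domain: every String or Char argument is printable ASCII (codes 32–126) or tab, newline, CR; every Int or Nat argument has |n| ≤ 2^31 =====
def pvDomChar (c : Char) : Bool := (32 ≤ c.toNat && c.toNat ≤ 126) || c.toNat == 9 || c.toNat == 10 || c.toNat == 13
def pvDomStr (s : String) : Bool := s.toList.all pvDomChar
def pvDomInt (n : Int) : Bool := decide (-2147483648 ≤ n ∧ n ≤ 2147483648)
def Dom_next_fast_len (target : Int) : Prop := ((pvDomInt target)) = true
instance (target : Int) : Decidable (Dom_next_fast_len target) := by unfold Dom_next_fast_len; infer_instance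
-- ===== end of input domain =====

-- B replaces A's table/bit-trick/nested-minimal-exponent search by generate-and-filter
-- over a power-of-two bound (objective: alternative; the return values are proved equal).

-- ===== PORT A =====
-- the 'hams' tuple literal of A
def pvHams : List Int := [8, 9, 10, 12, 15, 16, 18, 20, 24, 25, 27, 30, 32, 36, 40, 45, 48, 50, 54, 60, 64, 72, 75, 80, 81, 90, 96, 100, 108, 120, 125, 128, 135, 144, 150, 160, 162, 180, 192, 200, 216, 225, 240, 243, 250, 256, 270, 288, 300, 320, 324, 360, 375, 384, 400, 405, 432, 450, 480, 486, 500, 512, 540, 576, 600, 625, 640, 648, 675, 720, 729, 750, 768, 800, 810, 864, 900, 960, 972, 1000, 1024, 1080, 1125, 1152, 1200, 1215, 1250, 1280, 1296, 1350, 1440, 1458, 1500, 1536, 1600, 1620, 1728, 1800, 1875, 1920, 1944, 2000, 2025, 2048, 2160, 2187, 2250, 2304, 2400, 2430, 2500, 2560, 2592, 2700, 2880, 2916, 3000, 3072, 3125, 3200, 3240, 3375, 3456, 3600, 3645, 3750, 3840, 3888, 4000, 4050, 4096, 4320, 4374, 4500, 4608, 4800, 4860, 5000, 5120, 5184, 5400,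 5625, 5760, 5832, 6000, 6075, 6144, 6250, 6400, 6480, 6561, 6750, 6912, 7200, 7290, 7500, 7680, 7776, 8000, 8100, 8192, 8640, 8748, 9000, 9216, 9375, 9600, 9720, 10000]

-- bisect.bisect_left on a sorted list: insertion point = length of the prefix of smaller elements
def pvBisectLeft (l : List Int) (x : Int) : Nat := (l.takeWhile (fun y => decide (y < x))).length

-- 'x < match' where match : Option Int, none = float('inf')
def pvOptLt (x : Int) (m : Option Int) : Bool :=
  match m with
  | none => true
  | some v => decide (x < v)

-- the inner 'while p35 < target' loop; Sum.inr r = 'return r' out of the whole function,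
-- Sum.inl (p35, match) = normal loop exit.  Fuel only makes the recursion total; with the
-- fuel used below the 0 case is never reached with p35 < target (proved in the lemmas).
def pvInnerA (t : Int) : Nat → Int → Option Int → ((Int × Option Int) ⊕ Int)
  | 0, p35, m => Sum.inl (p35, m)
  | fuel + 1, p35, m =>
    if p35 < t then
      let quotient := -(PySem.Int.floordiv (-t) p35)       -- -(-target // p35)
      let p2 : Int := 2 ^ PySem.Int.bitLength (quotient - 1)
      let N := p2 * p35
      if N = t then Sum.inr N
      else
        let m' := if pvOptLt N m then some N else m
        let p35' := p35 * 3
        if p35' = t then Sum.inr p35'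
        else pvInnerA t fuel p35' m'
    else Sum.inl (p35, m)

-- the outer 'while p5 < target' loop, including the trailing 'if p5 < match: …; return match'
def pvOuterA (t : Int) : Nat → Int → Option Int → Int
  | 0, p5, m =>
      match m with
      | none => p5
      | some v => if p5 < v then p5 else v
  | fuel + 1, p5, m =>
    if p5 < t then
      match pvInnerA t t.natAbs p5 m with
      | Sum.inr r => r
      | Sum.inl (p35f, m1) =>
        let m2 := if pvOptLt p35f m1 then some p35f else m1
        let p5' := p5 * 5
        if p5' = t then p5'
        else pvOuterA t fuel p5' m2
    else
      match m with
      | none => p5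
      | some v => if p5 < v then p5 else v

def next_fast_len (target : Int) : Int :=
  if target ≤ 6 then target
  else if PySem.Int.band target (target - 1) = 0 then target
  else if target ≤ (PySem.List.pyGet? pvHams (-1)).getD 0 then
    (pvHams.getD (pvBisectLeft pvHams target) 0)
  else pvOuterA target target.natAbs 1 none

-- ===== PORT B =====
-- _powers(p, bound): powers of p that are ≤ bound (fuel only makes the loop total)
def pvPowers (p bound : Int) : Nat → Int → List Int
  | 0, _ => []
  | fuel + 1, x => if x ≤ bound then x :: pvPowers p bound fuel (x * p) else []

-- _smooth_upto(bound)
def pvSmoothUpto (bound : Int) : List Int :=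
  (pvPowers 5 bound (bound.natAbs + 1) 1).flatMap fun p5 =>
    (pvPowers 3 (PySem.Int.floordiv bound p5) (bound.natAbs + 1) 1).flatMap fun p3 =>
      (pvPowers 2 (PySem.Int.floordiv bound (p5 * p3)) (bound.natAbs + 1) 1).map fun p2 =>
        p5 * p3 * p2

-- 'bound = 1; while bound < target: bound *= 2'
def pvPow2Ge (t : Int) : Nat → Int → Int
  | 0, b => b
  | fuel + 1, b => if b < t then pvPow2Ge t fuel (2 * b) else b

def next_fast_len_alt (target : Int) : Int :=
  if target ≤ 6 then target
  else
    let bound := pvPow2Ge target target.natAbs 1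
    -- min(n for n in _smooth_upto(bound) if n >= target); the list is never empty (bound is in it)
    ((PySem.List.min? ((pvSmoothUpto bound).filter (fun n => decide (target ≤ n))) (fun n => n)).getD 0)

-- ===== PRECONDITION & SPEC =====
def Spec_next_fast_len (target : Int) (out : Int) : Prop := out = next_fast_len_alt target
instance (target : Int) (out : Int) : Decidable (Spec_next_fast_len target out) := by unfold Spec_next_fast_len; infer_instance

-- ===== CLAIM (what is proved, stated in full; the proofs are below) =====
def Claim_equal_next_fast_len : Prop := ∀ (target : Int), Dom_next_fast_len target → Spec_next_fast_len target (next_fast_len target)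

-- ===== LEMMAS AND PROOFS =====

-- n is 5-smooth
def pvSm (n : Int) : Prop := ∃ i j k : Nat, n = 2 ^ i * 3 ^ j * 5 ^ k

-- n is the least 5-smooth number ≥ t
def pvLS (t n : Int) : Prop := t ≤ n ∧ pvSm n ∧ ∀ x, t ≤ x → pvSm x → n ≤ x

theorem pvSm_mul3 {n : Int} (h : pvSm n) : pvSm (n * 3) := by
  obtain ⟨i, j, k, rfl⟩ := h; exact ⟨i, j + 1, k, by ring⟩

theorem pvSm_mul5 {n : Int} (h : pvSm n) : pvSm (n * 5) := by
  obtain ⟨i, j, k, rfl⟩ := h; exact ⟨i, j, k + 1, by ring⟩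

theorem pvSm_pow2_mul {n : Int} (e : Nat) (h : pvSm n) : pvSm (2 ^ e * n) := by
  obtain ⟨i, j, k, rfl⟩ := h; exact ⟨e + i, j, k, by ring⟩

theorem pv_natAbs_le_pow {t : Int} (b : Nat) (hb : 2 ≤ b) (_ht : 1 ≤ t) : t ≤ (b : Int) ^ t.natAbs := by
  have h1 : t.natAbs < 2 ^ t.natAbs := Nat.lt_two_pow_self
  have h2 : 2 ^ t.natAbs ≤ b ^ t.natAbs := Nat.pow_le_pow_left hb _
  have h4 : ((b ^ t.natAbs : Nat) : Int) = (b : Int) ^ t.natAbs := by push_cast; ring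
  calc t ≤ (t.natAbs : Int) := Int.le_natAbs
    _ ≤ ((b ^ t.natAbs : Nat) : Int) := by exact_mod_cast (lt_of_lt_of_le h1 h2).le
    _ = (b : Int) ^ t.natAbs := h4

theorem pvLS_exists {t : Int} (ht : 1 ≤ t) : ∃ n, pvLS t n := by
  obtain ⟨lb, ⟨hlb1, hlb2⟩, hmin⟩ :=
    Int.exists_least_of_bdd (P := fun n => t ≤ n ∧ pvSm n)
      ⟨t, fun z hz => hz.1⟩
      ⟨2 ^ t.natAbs, pv_natAbs_le_pow 2 le_rfl ht, ⟨t.natAbs, 0, 0, by ring⟩⟩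
  exact ⟨lb, hlb1, hlb2, fun x hx hs => hmin x ⟨hx, hs⟩⟩

-- ---- factor-stripping checker (proof-side only; used to 'decide' facts about the table) ----
def stripF (p : Nat) : Nat → Nat → Nat
  | 0, n => n
  | f + 1, n => if 2 ≤ p ∧ 0 < n ∧ p ∣ n then stripF p f (n / p) else n

def smB (n : Nat) : Bool := stripF 5 n (stripF 3 n (stripF 2 n n)) == 1

theorem stripF_le (p : Nat) : ∀ f n, stripF p f n ≤ n := by
  intro f
  induction f with
  | zero => intro n; simp [stripF]
  | succ f ih =>
    intro n
    simp only [stripF]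
    split
    · exact le_trans (ih _) (Nat.div_le_self _ _)
    · exact le_rfl

theorem stripF_of_not_dvd {p m : Nat} (h : ¬ p ∣ m) : ∀ f, stripF p f m = m := by
  intro f; cases f with
  | zero => rfl
  | succ f => simp only [stripF]; rw [if_neg]; rintro ⟨-, -, hd⟩; exact h hd

theorem stripF_spec {p : Nat} (hp : 2 ≤ p) :
    ∀ f n, 0 < n → n ≤ f → ∃ v, n = p ^ v * stripF p f n ∧ ¬ p ∣ stripF p f n := by
  intro f
  induction f with
  | zero => intro n hn hf; omega
  | succ f ih =>
    intro n hn hf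
    by_cases hd : p ∣ n
    · have hguard : 2 ≤ p ∧ 0 < n ∧ p ∣ n := ⟨hp, hn, hd⟩
      have hdivpos : 0 < n / p := Nat.div_pos (Nat.le_of_dvd hn hd) (by omega)
      have hlt : n / p < n := Nat.div_lt_self hn (by omega)
      obtain ⟨v, hv1, hv2⟩ := ih (n / p) hdivpos (by omega)
      refine ⟨v + 1, ?_, ?_⟩
      · simp only [stripF, if_pos hguard]
        rw [pow_succ]
        have : n = p * (n / p) := (Nat.mul_div_cancel' hd).symm
        calc n = p * (n / p) := this
          _ = p * (p ^ v * stripF p f (n / p)) := by rw [← hv1]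
          _ = p ^ v * p * stripF p f (n / p) := by ring
      · simp only [stripF, if_pos hguard]; exact hv2
    · refine ⟨0, ?_, ?_⟩
      · rw [stripF_of_not_dvd hd]; ring
      · rw [stripF_of_not_dvd hd]; exact hd

theorem stripF_pow_mul {p m : Nat} (hp : 2 ≤ p) (hm : 0 < m) (hnd : ¬ p ∣ m) :
    ∀ v f, v ≤ f → stripF p f (p ^ v * m) = m := by
  intro v
  induction v with
  | zero => intro f _; rw [pow_zero, one_mul]; exact stripF_of_not_dvd hnd f
  | succ v ih =>
    intro f hvf
    obtain ⟨f', rfl⟩ : ∃ f', f = f' + 1 := ⟨f - 1, by omega⟩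
    have hguard : 2 ≤ p ∧ 0 < p ^ (v + 1) * m ∧ p ∣ p ^ (v + 1) * m :=
      ⟨hp, by positivity, ⟨p ^ v * m, by ring⟩⟩
    simp only [stripF, if_pos hguard]
    have hdiv : p ^ (v + 1) * m / p = p ^ v * m := by
      rw [pow_succ]
      rw [show p ^ v * p * m = p * (p ^ v * m) by ring]
      exact Nat.mul_div_cancel_left _ (by omega)
    rw [hdiv]; exact ih f' (by omega)

theorem pv_not_dvd_35 (j k : Nat) : ¬ 2 ∣ 3 ^ j * 5 ^ k := by
  intro h
  rcases (Nat.Prime.dvd_mul Nat.prime_two).mp h with h' | h'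
  · exact absurd (Nat.Prime.dvd_of_dvd_pow Nat.prime_two h') (by decide)
  · exact absurd (Nat.Prime.dvd_of_dvd_pow Nat.prime_two h') (by decide)

theorem pv_not_dvd_5 (k : Nat) : ¬ (3:Nat) ∣ 5 ^ k := by
  intro h
  exact absurd (Nat.Prime.dvd_of_dvd_pow Nat.prime_three h) (by decide)

theorem smB_iff {n : Nat} (hn : 0 < n) :
    smB n = true ↔ ∃ i j k : Nat, n = 2 ^ i * 3 ^ j * 5 ^ k := by
  constructor
  · intro h
    obtain ⟨i, hi, hnd2⟩ := stripF_spec (p := 2) le_rfl n n hn le_rfl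
    set a := stripF 2 n n with ha
    have hapos : 0 < a := by rcases Nat.eq_zero_or_pos a with h0 | h0; · omega
                             · exact h0
    have hale : a ≤ n := stripF_le 2 n n
    obtain ⟨j, hj, hnd3⟩ := stripF_spec (p := 3) (by omega) n a hapos hale
    set b := stripF 3 n a with hb
    have hbpos : 0 < b := by rcases Nat.eq_zero_or_pos b with h0 | h0; · omega
                             · exact h0
    have hble : b ≤ n := le_trans (stripF_le 3 n a) hale
    obtain ⟨k, hk, hnd5⟩ := stripF_spec (p := 5) (by omega) n b hbpos hble
    have hc : stripF 5 n b = 1 := by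
      have := h; unfold smB at this
      rw [← ha, ← hb] at this
      rwa [beq_iff_eq] at this
    refine ⟨i, j, k, ?_⟩
    rw [hi, hj, hk, hc]; ring
  · rintro ⟨i, j, k, hn'⟩
    unfold smB
    have hm1 : 0 < 3 ^ j * 5 ^ k := by positivity
    have h2le : 2 ^ i * (3 ^ j * 5 ^ k) ≤ n := le_of_eq (by rw [hn']; ring)
    have h3le : 3 ^ j * 5 ^ k ≤ n := le_trans (Nat.le_mul_of_pos_left _ (by positivity)) h2le
    have hs2 : stripF 2 n n = 3 ^ j * 5 ^ k := by
      rw [hn', show (2:Nat) ^ i * 3 ^ j * 5 ^ k = 2 ^ i * (3 ^ j * 5 ^ k) by ring]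
      refine stripF_pow_mul le_rfl hm1 (pv_not_dvd_35 j k) i _ ?_
      refine le_of_lt ?_
      calc i < 2 ^ i := Nat.lt_two_pow_self
        _ ≤ 2 ^ i * (3 ^ j * 5 ^ k) := Nat.le_mul_of_pos_right _ hm1
    have hs3 : stripF 3 n (3 ^ j * 5 ^ k) = 5 ^ k := by
      refine stripF_pow_mul (by norm_num) (by positivity) (pv_not_dvd_5 k) j _ ?_
      refine le_of_lt ?_
      calc j < 3 ^ j := Nat.lt_pow_self (by norm_num)
        _ ≤ 3 ^ j * 5 ^ k := Nat.le_mul_of_pos_right _ (by positivity)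
        _ ≤ n := h3le
    have hs5 : stripF 5 n (5 ^ k) = 1 := by
      rw [show (5:Nat) ^ k = 5 ^ k * 1 by ring]
      refine stripF_pow_mul (by norm_num) one_pos (by decide) k _ ?_
      refine le_of_lt ?_
      calc k < 5 ^ k := Nat.lt_pow_self (by norm_num)
        _ = 5 ^ k * 1 := by ring
        _ ≤ n := by
              rw [mul_one]
              exact le_trans (Nat.le_mul_of_pos_left _ (by positivity)) h3le
    rw [hs2, hs3, hs5]
    rfl

theorem pvSm_natCast_iff (n : Nat) : pvSm (n : Int) ↔ ∃ i j k : Nat, n = 2 ^ i * 3 ^ j * 5 ^ k := by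
  constructor
  · rintro ⟨i, j, k, h⟩
    refine ⟨i, j, k, ?_⟩
    have : (n : Int) = ((2 ^ i * 3 ^ j * 5 ^ k : Nat) : Int) := by push_cast; exact h
    exact_mod_cast this
  · rintro ⟨i, j, k, h⟩
    exact ⟨i, j, k, by exact_mod_cast congrArg (Nat.cast : Nat → Int) h⟩

theorem pvSm_iff_smB {x : Int} (hx : 1 ≤ x) : pvSm x ↔ smB x.toNat = true := by
  have hx' : ((x.toNat : Nat) : Int) = x := Int.toNat_of_nonneg (by omega)
  rw [← hx', pvSm_natCast_iff]
  exact (smB_iff (by omega)).symm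


-- ---- facts about the hams table, checked by kernel evaluation ----
set_option maxRecDepth 10000 in
theorem pvHams_pairwise : pvHams.Pairwise (· < ·) := by decide

set_option maxRecDepth 100000 in
set_option maxHeartbeats 4000000 in
theorem pvHams_complete_b :
    ((List.range 10001).all fun n => !(smB n) || decide (n < 7) || pvHams.contains ((n : Nat) : Int)) = true := by
  decide

theorem pvHams_smooth_b : (pvHams.all fun x => smB x.natAbs && decide (8 ≤ x)) = true := by decide

theorem pvHams_smooth {x : Int} (hx : x ∈ pvHams) : pvSm x ∧ 8 ≤ x := by
  have h := List.all_eq_true.mp pvHams_smooth_b x hx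
  rw [Bool.and_eq_true, decide_eq_true_eq] at h
  have h8 : 8 ≤ x := h.2
  have : x.natAbs = x.toNat := by omega
  refine ⟨(pvSm_iff_smB (by omega)).mpr (by rw [← this]; exact h.1), h8⟩

theorem pvHams_complete {x : Int} (h7 : 7 ≤ x) (h10 : x ≤ 10000) (hsm : pvSm x) : x ∈ pvHams := by
  have hx : x = ((x.toNat : Nat) : Int) := by omega
  have hr : x.toNat ∈ List.range 10001 := by rw [List.mem_range]; omega
  have h := List.all_eq_true.mp pvHams_complete_b _ hr
  rw [Bool.or_eq_true, Bool.or_eq_true, decide_eq_true_eq] at h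
  rcases h with (h | h) | h
  · rw [Bool.not_eq_eq_eq_not, Bool.not_true] at h
    exact absurd ((pvSm_iff_smB (by omega)).mp hsm) (by simp [h])
  · omega
  · rw [List.contains_iff_mem] at h; rwa [hx]

-- ---- generic table-lookup lemmas ----
theorem pv_getD_takeWhile (l : List Int) (p : Int → Bool) :
    l.getD (l.takeWhile p).length 0 = (l.dropWhile p).headD 0 := by
  induction l with
  | nil => rfl
  | cons a l ih =>
    by_cases h : p a
    · rw [List.takeWhile_cons_of_pos h, List.dropWhile_cons_of_pos h, List.length_cons,
        List.getD_cons_succ]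
      exact ih
    · rw [List.takeWhile_cons_of_neg (by simpa using h), List.dropWhile_cons_of_neg (by simpa using h)]
      simp

theorem pv_dropWhile_sorted (t : Int) :
    ∀ l : List Int, l.Pairwise (· < ·) →
      l.dropWhile (fun y => decide (y < t)) = l.filter (fun y => decide (t ≤ y)) := by
  intro l hl
  induction l with
  | nil => rfl
  | cons a l ih =>
    rw [List.pairwise_cons] at hl
    by_cases h : a < t
    · rw [List.dropWhile_cons_of_pos (by simpa using h), List.filter_cons_of_neg (by simpa using h)]
      exact ih hl.2
    · rw [List.dropWhile_cons_of_neg (by simpa using h), List.filter_cons_of_pos (by simpa using not_lt.mp h)]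
      congr 1
      refine (List.filter_eq_self.mpr ?_).symm
      intro b hb
      have : a < b := hl.1 b hb
      simp; omega

theorem pv_headD_filter_min {l : List Int} {t L : Int} (hpw : l.Pairwise (· < ·))
    (hmem : L ∈ l) (htL : t ≤ L) (hmin : ∀ y ∈ l, t ≤ y → L ≤ y) :
    (l.filter (fun y => decide (t ≤ y))).headD 0 = L := by
  induction l with
  | nil => cases hmem
  | cons a l ih =>
    rw [List.pairwise_cons] at hpw
    by_cases h : t ≤ a
    · rw [List.filter_cons_of_pos (by simpa using h)]
      have hLa : L ≤ a := hmin a List.mem_cons_self h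
      have haL : a ≤ L := by
        rcases List.mem_cons.mp hmem with rfl | hm
        · exact le_rfl
        · exact (hpw.1 L hm).le
      simp [le_antisymm haL hLa]
    · rw [List.filter_cons_of_neg (by simpa using h)]
      have hLa : L ≠ a := by rintro rfl; exact h htL
      exact ih hpw.2 ((List.mem_cons.mp hmem).resolve_left hLa)
        (fun y hy hty => hmin y (List.mem_cons_of_mem _ hy) hty)

theorem pv_table_correct {t L : Int} (h7 : 7 ≤ t) (h10 : t ≤ 10000) (hLS : pvLS t L) :
    pvHams.getD (pvBisectLeft pvHams t) 0 = L := by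
  obtain ⟨htL, hsmL, hminL⟩ := hLS
  have hL10 : L ≤ 10000 := hminL 10000 h10 ⟨4, 0, 4, by norm_num⟩
  have hmem : L ∈ pvHams := pvHams_complete (by omega) hL10 hsmL
  unfold pvBisectLeft
  rw [pv_getD_takeWhile, pv_dropWhile_sorted t _ pvHams_pairwise]
  exact pv_headD_filter_min pvHams_pairwise hmem htL
    (fun y hy hty => hminL y hty (pvHams_smooth hy).1)

-- ---- the power-of-two branch : target & (target-1) == 0 ----
theorem pv_pow2_of_land_pred : ∀ n : Nat, 0 < n → n &&& (n - 1) = 0 → ∃ c, n = 2 ^ c := by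
  intro n
  induction n using Nat.strong_induction_on with
  | _ n ih =>
    intro hn h
    rcases Nat.even_or_odd n with he | ho
    · obtain ⟨m, hm⟩ := he
      have hm2 : n = 2 * m := by omega
      have hmpos : 0 < m := by omega
      have hml : m &&& (m - 1) = 0 := by
        apply Nat.eq_of_testBit_eq
        intro i
        rw [Nat.zero_testBit, Nat.testBit_land]
        have e1 : m.testBit i = n.testBit (i + 1) := by
          rw [Nat.testBit_add_one, hm2, Nat.mul_div_cancel_left _ (by norm_num)]
        have e2 : (m - 1).testBit i = (n - 1).testBit (i + 1) := by
          rw [Nat.testBit_add_one]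
          congr 1
          omega
        rw [e1, e2, ← Nat.testBit_land, h, Nat.zero_testBit]
      obtain ⟨c, hc⟩ := ih m (by omega) hmpos hml
      exact ⟨c + 1, by rw [hm2, hc, pow_succ]; ring⟩
    · rcases Nat.lt_or_ge n 2 with h1 | h1
      · exact ⟨0, by omega⟩
      · exfalso
        obtain ⟨m, hm⟩ := ho
        have hmpos : 0 < m := by omega
        have hex : ∃ i, m.testBit i = true := by
          by_contra hno
          push_neg at hno
          have : m = 0 := Nat.eq_of_testBit_eq fun i => by
            rw [Nat.zero_testBit]; exact Bool.eq_false_iff.mpr (by simpa using hno i)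
          omega
        obtain ⟨i, hi⟩ := hex
        have e1 : n.testBit (i + 1) = m.testBit i := by
          rw [Nat.testBit_add_one]; congr 1; omega
        have e2 : (n - 1).testBit (i + 1) = m.testBit i := by
          rw [Nat.testBit_add_one]; congr 1; omega
        have : (n &&& (n - 1)).testBit (i + 1) = true := by
          rw [Nat.testBit_land, e1, e2, hi]; rfl
        rw [h, Nat.zero_testBit] at this
        exact absurd this (by simp)

theorem pv_band_pow2 {t : Int} (h7 : 7 ≤ t) (h : PySem.Int.band t (t - 1) = 0) : pvSm t := by
  have h0 : 0 ≤ t := by omega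
  have h1 : 0 ≤ t - 1 := by omega
  unfold PySem.Int.band at h
  rw [if_pos h0, if_pos h1] at h
  have hn : t.toNat &&& (t - 1).toNat = 0 := by exact_mod_cast h
  have ht1 : (t - 1).toNat = t.toNat - 1 := by omega
  rw [ht1] at hn
  obtain ⟨c, hc⟩ := pv_pow2_of_land_pred t.toNat (by omega) hn
  have h' : ((t.toNat : Nat) : Int) = t := Int.toNat_of_nonneg h0
  refine ⟨c, 0, 0, ?_⟩
  rw [← h', hc]
  push_cast
  ring

-- ---- ceiling division and bit_length helpers ----
theorem pv_ceil_bounds {t p : Int} (hp : 0 < p) :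
    (-(PySem.Int.floordiv (-t) p) - 1) * p < t ∧ t ≤ -(PySem.Int.floordiv (-t) p) * p :=
  (PySem.Int.neg_floordiv_neg_eq_iff_of_pos hp).mp rfl

theorem pv_le_two_pow_bitLength {q : Int} (hq : 1 ≤ q) :
    q ≤ 2 ^ PySem.Int.bitLength (q - 1) := by
  have h := PySem.Int.lt_two_pow_bitLength (q - 1)
  have h2 : q - 1 ≤ ((q - 1).natAbs : Int) := Int.le_natAbs
  have h3 : ((q - 1).natAbs : Int) < ((2 ^ PySem.Int.bitLength (q - 1) : Nat) : Int) := by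
    exact_mod_cast h
  have h4 : ((2 ^ PySem.Int.bitLength (q - 1) : Nat) : Int) = 2 ^ PySem.Int.bitLength (q - 1) := by
    push_cast; ring
  omega

theorem pv_bitLength_le {q : Int} {c : Nat} (hq : 1 ≤ q) (h : q ≤ 2 ^ c) :
    PySem.Int.bitLength (q - 1) ≤ c := by
  rcases eq_or_lt_of_le hq with heq | hgt
  · rw [← heq]; norm_num [PySem.Int.bitLength_zero]
  · have hne : q - 1 ≠ 0 := by omega
    have hlow := PySem.Int.two_pow_bitLength_le (q - 1) hne
    set bl := PySem.Int.bitLength (q - 1) with hbl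
    have habs : ((q - 1).natAbs : Int) = q - 1 := by omega
    have hQlt : (q - 1).natAbs < 2 ^ c := by
      have hcast : ((2 ^ c : Nat) : Int) = (2:Int) ^ c := by push_cast; ring
      have : ((q - 1).natAbs : Int) < ((2 ^ c : Nat) : Int) := by rw [hcast]; omega
      exact_mod_cast this
    have hblc : 2 ^ (bl - 1) < 2 ^ c := lt_of_le_of_lt hlow hQlt
    have : bl - 1 < c := (Nat.pow_lt_pow_iff_right (by norm_num)).mp hblc
    rcases Nat.eq_zero_or_pos bl with h0 | h0
    · omega
    · omega

-- ---- the main loop of A ----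
-- N as computed in the inner loop body
def pvN (t p35 : Int) : Int :=
  2 ^ PySem.Int.bitLength (-(PySem.Int.floordiv (-t) p35) - 1) * p35

theorem pvInnerA_zero (t p35 : Int) (m : Option Int) :
    pvInnerA t 0 p35 m = Sum.inl (p35, m) := rfl

theorem pvInnerA_succ (t : Int) (fuel : Nat) (p35 : Int) (m : Option Int) :
    pvInnerA t (fuel + 1) p35 m =
      if p35 < t then
        (if pvN t p35 = t then Sum.inr (pvN t p35)
         else if p35 * 3 = t then Sum.inr (p35 * 3)
         else pvInnerA t fuel (p35 * 3) (if pvOptLt (pvN t p35) m then some (pvN t p35) else m))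
      else Sum.inl (p35, m) := rfl

theorem pvOuterA_zero (t p5 : Int) (m : Option Int) :
    pvOuterA t 0 p5 m = (match m with | none => p5 | some v => if p5 < v then p5 else v) := rfl

theorem pvOuterA_succ (t : Int) (fuel : Nat) (p5 : Int) (m : Option Int) :
    pvOuterA t (fuel + 1) p5 m =
      if p5 < t then
        (match pvInnerA t t.natAbs p5 m with
         | Sum.inr r => r
         | Sum.inl (p35f, m1) =>
             if p5 * 5 = t then p5 * 5
             else pvOuterA t fuel (p5 * 5) (if pvOptLt p35f m1 then some p35f else m1))
      else (match m with | none => p5 | some v => if p5 < v then p5 else v) := rfl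

theorem pvOptLt_true {x v : Int} (h : pvOptLt x (some v) = true) : x < v := by
  simpa [pvOptLt] using h

theorem pvOptLt_false {x : Int} {m : Option Int} (h : pvOptLt x m = false) :
    ∃ v, m = some v ∧ v ≤ x := by
  cases m with
  | none => simp [pvOptLt] at h
  | some v => exact ⟨v, rfl, by simpa [pvOptLt] using h⟩

-- the invariant carried by `match`: any stored value is a 5-smooth number ≥ target
def pvMInv (t : Int) (m : Option Int) : Prop := ∀ v, m = some v → t ≤ v ∧ pvSm v

theorem pvMInv_none (t : Int) : pvMInv t none := fun v hv => by cases hv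

theorem pv_q_ge_one {t p35 : Int} (h1t : 1 ≤ t) (h1 : 1 ≤ p35) :
    1 ≤ -(PySem.Int.floordiv (-t) p35) := by
  have hb := pv_ceil_bounds (t := t) (p := p35) (by omega)
  set q := -(PySem.Int.floordiv (-t) p35) with hq
  by_contra hcon
  have hq0 : q ≤ 0 := by omega
  have : q * p35 ≤ 0 := mul_nonpos_of_nonpos_of_nonneg hq0 (by omega)
  omega

theorem pvN_ge {t p35 : Int} (h1t : 1 ≤ t) (h1 : 1 ≤ p35) : t ≤ pvN t p35 := by
  have hb := pv_ceil_bounds (t := t) (p := p35) (by omega)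
  have hq1 := pv_q_ge_one h1t h1
  set q := -(PySem.Int.floordiv (-t) p35) with hq
  have h2 : q ≤ 2 ^ PySem.Int.bitLength (q - 1) := pv_le_two_pow_bitLength hq1
  calc t ≤ q * p35 := hb.2
    _ ≤ 2 ^ PySem.Int.bitLength (q - 1) * p35 := by
        exact mul_le_mul_of_nonneg_right h2 (by omega)

theorem pvN_le {t p35 : Int} {c : Nat} (h1t : 1 ≤ t) (h1 : 1 ≤ p35)
    (hc : t ≤ 2 ^ c * p35) : pvN t p35 ≤ 2 ^ c * p35 := by
  have hb := pv_ceil_bounds (t := t) (p := p35) (by omega)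
  have hq1 := pv_q_ge_one h1t h1
  set q := -(PySem.Int.floordiv (-t) p35) with hq
  have hqc : q ≤ 2 ^ c := by
    have hlt : (q - 1) * p35 < 2 ^ c * p35 := lt_of_lt_of_le hb.1 hc
    have := lt_of_mul_lt_mul_right hlt (by omega : (0:Int) ≤ p35)
    omega
  have hbl : PySem.Int.bitLength (q - 1) ≤ c := pv_bitLength_le hq1 hqc
  exact mul_le_mul_of_nonneg_right (pow_le_pow_right₀ (by norm_num) hbl) (by omega)

theorem pvN_sm {t p35 : Int} (h : pvSm p35) : pvSm (pvN t p35) := pvSm_pow2_mul _ h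

theorem pvInner_mono (t : Int) : ∀ (fuel : Nat) (p35 : Int) (m : Option Int) (p35f : Int)
    (m1 : Option Int) (v : Int),
    pvInnerA t fuel p35 m = Sum.inl (p35f, m1) → m = some v →
    ∃ v1, m1 = some v1 ∧ v1 ≤ v := by
  intro fuel
  induction fuel with
  | zero =>
    intro p35 m p35f m1 v h hm
    rw [pvInnerA_zero] at h
    simp only [Sum.inl.injEq, Prod.mk.injEq] at h
    exact ⟨v, by rw [← h.2, hm], le_rfl⟩
  | succ fuel ih =>
    intro p35 m p35f m1 v h hm
    rw [pvInnerA_succ] at h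
    by_cases hlt : p35 < t
    · rw [if_pos hlt] at h
      by_cases hN : pvN t p35 = t
      · rw [if_pos hN] at h; cases h
      · rw [if_neg hN] at h
        by_cases h3 : p35 * 3 = t
        · rw [if_pos h3] at h; cases h
        · rw [if_neg h3] at h
          subst hm
          by_cases hopt : pvOptLt (pvN t p35) (some v) = true
          · rw [if_pos hopt] at h
            obtain ⟨v1, hv1, hle⟩ := ih _ _ _ _ (pvN t p35) h rfl
            exact ⟨v1, hv1, le_trans hle (pvOptLt_true hopt).le⟩
          · rw [if_neg hopt] at h
            exact ih _ _ _ _ v h rfl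
    · rw [if_neg hlt] at h
      simp only [Sum.inl.injEq, Prod.mk.injEq] at h
      exact ⟨v, by rw [← h.2, hm], le_rfl⟩

theorem pvInner_sound (t : Int) (h1t : 1 ≤ t) : ∀ (fuel : Nat) (p35 : Int) (m : Option Int),
    1 ≤ p35 → pvSm p35 → t ≤ p35 * 3 ^ fuel → pvMInv t m →
    (∀ r, pvInnerA t fuel p35 m = Sum.inr r → r = t ∧ pvSm t) ∧
    (∀ p35f m1, pvInnerA t fuel p35 m = Sum.inl (p35f, m1) →
        t ≤ p35f ∧ pvSm p35f ∧ pvMInv t m1) := by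
  intro fuel
  induction fuel with
  | zero =>
    intro p35 m h1 hsm hfuel hminv
    rw [pow_zero, mul_one] at hfuel
    constructor
    · intro r h; rw [pvInnerA_zero] at h; cases h
    · intro p35f m1 h
      rw [pvInnerA_zero] at h
      simp only [Sum.inl.injEq, Prod.mk.injEq] at h
      obtain ⟨rfl, rfl⟩ := h
      exact ⟨hfuel, hsm, hminv⟩
  | succ fuel ih =>
    intro p35 m h1 hsm hfuel hminv
    by_cases hlt : p35 < t
    · have hNt : t ≤ pvN t p35 := pvN_ge h1t h1
      have hNsm : pvSm (pvN t p35) := pvN_sm hsm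
      by_cases hN : pvN t p35 = t
      · constructor
        · intro r h
          rw [pvInnerA_succ, if_pos hlt, if_pos hN] at h
          cases h
          exact ⟨hN, hN ▸ hNsm⟩
        · intro p35f m1 h
          rw [pvInnerA_succ, if_pos hlt, if_pos hN] at h
          cases h
      · by_cases h3 : p35 * 3 = t
        · constructor
          · intro r h
            rw [pvInnerA_succ, if_pos hlt, if_neg hN, if_pos h3] at h
            cases h
            exact ⟨h3, h3 ▸ pvSm_mul3 hsm⟩
          · intro p35f m1 h
            rw [pvInnerA_succ, if_pos hlt, if_neg hN, if_pos h3] at h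
            cases h
        · have hrec := ih (p35 * 3)
            (if pvOptLt (pvN t p35) m then some (pvN t p35) else m)
            (by omega) (pvSm_mul3 hsm)
            (by rw [pow_succ] at hfuel; calc t ≤ p35 * (3 ^ fuel * 3) := hfuel
                  _ = p35 * 3 * 3 ^ fuel := by ring)
            (by intro v hv
                by_cases hopt : pvOptLt (pvN t p35) m = true
                · rw [if_pos hopt] at hv
                  cases hv
                  exact ⟨hNt, hNsm⟩
                · rw [if_neg hopt] at hv
                  exact hminv v hv)
          constructor
          · intro r h
            rw [pvInnerA_succ, if_pos hlt, if_neg hN, if_neg h3] at h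
            exact hrec.1 r h
          · intro p35f m1 h
            rw [pvInnerA_succ, if_pos hlt, if_neg hN, if_neg h3] at h
            exact hrec.2 p35f m1 h
    · constructor
      · intro r h; rw [pvInnerA_succ, if_neg hlt] at h; cases h
      · intro p35f m1 h
        rw [pvInnerA_succ, if_neg hlt] at h
        simp only [Sum.inl.injEq, Prod.mk.injEq] at h
        obtain ⟨rfl, rfl⟩ := h
        exact ⟨not_lt.mp hlt, hsm, hminv⟩

theorem pvInner_dom (t L : Int) (h1t : 1 ≤ t) (c b a : Nat)
    (hL : L = 2 ^ c * 3 ^ b * 5 ^ a) (htL : t ≤ L) :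
    ∀ (fuel : Nat) (j : Nat) (p35 : Int) (m : Option Int),
      p35 = 3 ^ j * 5 ^ a → j ≤ b →
      ∀ p35f m1, pvInnerA t fuel p35 m = Sum.inl (p35f, m1) →
        p35f ≤ L ∨ ∃ v, m1 = some v ∧ v ≤ L := by
  intro fuel
  induction fuel with
  | zero =>
    intro j p35 m hp hj p35f m1 h
    rw [pvInnerA_zero] at h
    simp only [Sum.inl.injEq, Prod.mk.injEq] at h
    left
    rw [← h.1, hp, hL]
    calc (3:Int) ^ j * 5 ^ a ≤ 3 ^ b * 5 ^ a := by gcongr <;> norm_num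
      _ ≤ 2 ^ c * 3 ^ b * 5 ^ a := by
          have h2 : (1:Int) ≤ 2 ^ c := one_le_pow₀ (by norm_num)
          nlinarith [pow_pos (show (0:Int) < 3 by norm_num) b,
                     pow_pos (show (0:Int) < 5 by norm_num) a]
  | succ fuel ih =>
    intro j p35 m hp hj p35f m1 h
    rw [pvInnerA_succ] at h
    have hpos : (1:Int) ≤ p35 := by
      rw [hp]
      have h3j : (1:Int) ≤ 3 ^ j := one_le_pow₀ (by norm_num)
      have h5a : (1:Int) ≤ 5 ^ a := one_le_pow₀ (by norm_num)
      nlinarith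
    by_cases hlt : p35 < t
    · rw [if_pos hlt] at h
      by_cases hN : pvN t p35 = t
      · rw [if_pos hN] at h; cases h
      · rw [if_neg hN] at h
        by_cases h3 : p35 * 3 = t
        · rw [if_pos h3] at h; cases h
        · rw [if_neg h3] at h
          by_cases hjb : j < b
          · exact ih (j + 1) (p35 * 3) _ (by rw [hp]; ring) (by omega) p35f m1 h
          · have hje : j = b := by omega
            have hLp : L = 2 ^ c * p35 := by rw [hL, hp, hje]; ring
            have hNL : pvN t p35 ≤ L := by
              rw [hLp]
              exact pvN_le h1t hpos (by rw [← hLp]; exact htL)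
            right
            by_cases hopt : pvOptLt (pvN t p35) m = true
            · rw [if_pos hopt] at h
              obtain ⟨v1, hv1, hle⟩ := pvInner_mono t _ _ _ _ _ (pvN t p35) h rfl
              exact ⟨v1, hv1, le_trans hle hNL⟩
            · rw [if_neg hopt] at h
              obtain ⟨w, hw, hwle⟩ := pvOptLt_false (Bool.eq_false_iff.mpr hopt)
              obtain ⟨v1, hv1, hle⟩ := pvInner_mono t _ _ _ _ _ w h hw
              exact ⟨v1, hv1, le_trans hle (le_trans hwle hNL)⟩
    · rw [if_neg hlt] at h
      simp only [Sum.inl.injEq, Prod.mk.injEq] at h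
      left
      rw [← h.1, hp, hL]
      calc (3:Int) ^ j * 5 ^ a ≤ 3 ^ b * 5 ^ a := by gcongr <;> norm_num
        _ ≤ 2 ^ c * 3 ^ b * 5 ^ a := by
            have h2 : (1:Int) ≤ 2 ^ c := one_le_pow₀ (by norm_num)
            nlinarith [pow_pos (show (0:Int) < 3 by norm_num) b,
                       pow_pos (show (0:Int) < 5 by norm_num) a]

theorem pvOuter_le (t : Int) (h1t : 1 ≤ t) (H3 : t ≤ 3 ^ t.natAbs) :
    ∀ (fuel : Nat) (p5 : Int) (m : Option Int) (v : Int),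
      1 ≤ p5 → pvSm p5 → pvMInv t m → m = some v → pvOuterA t fuel p5 m ≤ v := by
  intro fuel
  induction fuel with
  | zero =>
    intro p5 m v h1 hsm hminv hm
    subst hm
    rw [pvOuterA_zero]
    simp only
    split <;> omega
  | succ fuel ih =>
    intro p5 m v h1 hsm hminv hm
    rw [pvOuterA_succ]
    by_cases hlt : p5 < t
    · rw [if_pos hlt]
      have hf3 : t ≤ p5 * 3 ^ t.natAbs := by
        calc t ≤ 3 ^ t.natAbs := H3
          _ = 1 * 3 ^ t.natAbs := (one_mul _).symm
          _ ≤ p5 * 3 ^ t.natAbs := by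
              exact mul_le_mul_of_nonneg_right h1 (by positivity)
      obtain ⟨hinr, hinl⟩ := pvInner_sound t h1t t.natAbs p5 m h1 hsm hf3 hminv
      cases hres : pvInnerA t t.natAbs p5 m with
      | inr r =>
        obtain ⟨rfl, -⟩ := hinr r hres
        exact (hminv v hm).1
      | inl pr =>
        obtain ⟨p35f, m1⟩ := pr
        obtain ⟨hp35f, hsmf, hminv1⟩ := hinl p35f m1 hres
        obtain ⟨v1, hv1, hv1le⟩ := pvInner_mono t _ _ _ _ _ v hres hm
        simp only
        by_cases h5t : p5 * 5 = t
        · rw [if_pos h5t]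
          exact le_trans (le_of_eq h5t) (hminv v hm).1
        · rw [if_neg h5t]
          have hm2 : pvMInv t (if pvOptLt p35f m1 then some p35f else m1) := by
            intro w hw
            by_cases hopt : pvOptLt p35f m1 = true
            · rw [if_pos hopt] at hw; cases hw; exact ⟨hp35f, hsmf⟩
            · rw [if_neg hopt] at hw; exact hminv1 w hw
          by_cases hopt : pvOptLt p35f m1 = true
          · rw [if_pos hopt]
            subst hv1
            have hlt2 : p35f < v1 := pvOptLt_true hopt
            exact le_trans (ih (p5 * 5) (some p35f) p35f (by omega) (pvSm_mul5 hsm)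
              (by rw [if_pos hopt] at hm2; exact hm2) rfl) (by omega)
          · rw [if_neg hopt]
            subst hv1
            exact le_trans (ih (p5 * 5) (some v1) v1 (by omega) (pvSm_mul5 hsm)
              (by rw [if_neg hopt] at hm2; exact hm2) rfl) hv1le
    · rw [if_neg hlt]
      subst hm
      simp only
      split <;> omega

theorem pvOuter_sound (t : Int) (h1t : 1 ≤ t) (H3 : t ≤ 3 ^ t.natAbs) :
    ∀ (fuel : Nat) (p5 : Int) (m : Option Int),
      1 ≤ p5 → pvSm p5 → t ≤ p5 * 5 ^ fuel → pvMInv t m →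
      t ≤ pvOuterA t fuel p5 m ∧ pvSm (pvOuterA t fuel p5 m) := by
  intro fuel
  induction fuel with
  | zero =>
    intro p5 m h1 hsm hfuel hminv
    rw [pow_zero, mul_one] at hfuel
    rw [pvOuterA_zero]
    cases m with
    | none => exact ⟨hfuel, hsm⟩
    | some v =>
      simp only
      split
      · exact ⟨hfuel, hsm⟩
      · exact hminv v rfl
  | succ fuel ih =>
    intro p5 m h1 hsm hfuel hminv
    rw [pvOuterA_succ]
    by_cases hlt : p5 < t
    · rw [if_pos hlt]
      have hf3 : t ≤ p5 * 3 ^ t.natAbs := by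
        calc t ≤ 3 ^ t.natAbs := H3
          _ = 1 * 3 ^ t.natAbs := (one_mul _).symm
          _ ≤ p5 * 3 ^ t.natAbs := mul_le_mul_of_nonneg_right h1 (by positivity)
      obtain ⟨hinr, hinl⟩ := pvInner_sound t h1t t.natAbs p5 m h1 hsm hf3 hminv
      cases hres : pvInnerA t t.natAbs p5 m with
      | inr r =>
        obtain ⟨rfl, hsmt⟩ := hinr r hres
        exact ⟨le_rfl, hsmt⟩
      | inl pr =>
        obtain ⟨p35f, m1⟩ := pr
        obtain ⟨hp35f, hsmf, hminv1⟩ := hinl p35f m1 hres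
        simp only
        by_cases h5t : p5 * 5 = t
        · rw [if_pos h5t]
          exact ⟨le_of_eq h5t.symm, h5t ▸ pvSm_mul5 hsm⟩
        · rw [if_neg h5t]
          refine ih (p5 * 5) _ (by omega) (pvSm_mul5 hsm) ?_ ?_
          · rw [pow_succ] at hfuel
            calc t ≤ p5 * (5 ^ fuel * 5) := hfuel
              _ = p5 * 5 * 5 ^ fuel := by ring
          · intro w hw
            by_cases hopt : pvOptLt p35f m1 = true
            · rw [if_pos hopt] at hw; cases hw; exact ⟨hp35f, hsmf⟩
            · rw [if_neg hopt] at hw; exact hminv1 w hw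
    · rw [if_neg hlt]
      have hge : t ≤ p5 := not_lt.mp hlt
      cases m with
      | none => exact ⟨hge, hsm⟩
      | some v =>
        simp only
        split
        · exact ⟨hge, hsm⟩
        · exact hminv v rfl

theorem pvOuter_dom (t L : Int) (h1t : 1 ≤ t) (H3 : t ≤ 3 ^ t.natAbs) (c b k : Nat)
    (hL : L = 2 ^ c * 3 ^ b * 5 ^ k) (htL : t ≤ L) :
    ∀ (fuel : Nat) (a : Nat) (p5 : Int) (m : Option Int),
      p5 = 5 ^ a → a ≤ k → pvMInv t m → pvOuterA t fuel p5 m ≤ L := by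
  have hp5L : ∀ a : Nat, a ≤ k → (5:Int) ^ a ≤ L := by
    intro a ha
    rw [hL]
    have h2 : (1:Int) ≤ 2 ^ c := one_le_pow₀ (by norm_num)
    have h3 : (1:Int) ≤ 3 ^ b := one_le_pow₀ (by norm_num)
    have h5 : (5:Int) ^ a ≤ 5 ^ k := pow_le_pow_right₀ (by norm_num) ha
    calc (5:Int) ^ a ≤ 5 ^ k := h5
      _ = 1 * 1 * 5 ^ k := by ring
      _ ≤ 2 ^ c * 3 ^ b * 5 ^ k := by gcongr <;> positivity
  intro fuel
  induction fuel with
  | zero =>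
    intro a p5 m hp ha hminv
    rw [pvOuterA_zero]
    have : p5 ≤ L := hp ▸ hp5L a ha
    cases m with
    | none => simpa using this
    | some v => simp only; split <;> omega
  | succ fuel ih =>
    intro a p5 m hp ha hminv
    have h1 : (1:Int) ≤ p5 := by rw [hp]; exact one_le_pow₀ (by norm_num)
    have hsm : pvSm p5 := by rw [hp]; exact ⟨0, 0, a, by ring⟩
    rw [pvOuterA_succ]
    by_cases hlt : p5 < t
    · rw [if_pos hlt]
      have hf3 : t ≤ p5 * 3 ^ t.natAbs := by
        calc t ≤ 3 ^ t.natAbs := H3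
          _ = 1 * 3 ^ t.natAbs := (one_mul _).symm
          _ ≤ p5 * 3 ^ t.natAbs := mul_le_mul_of_nonneg_right h1 (by positivity)
      obtain ⟨hinr, hinl⟩ := pvInner_sound t h1t t.natAbs p5 m h1 hsm hf3 hminv
      cases hres : pvInnerA t t.natAbs p5 m with
      | inr r =>
        obtain ⟨rfl, -⟩ := hinr r hres
        exact htL
      | inl pr =>
        obtain ⟨p35f, m1⟩ := pr
        obtain ⟨hp35f, hsmf, hminv1⟩ := hinl p35f m1 hres
        simp only
        by_cases h5t : p5 * 5 = t
        · rw [if_pos h5t]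
          exact le_trans (le_of_eq h5t) htL
        · rw [if_neg h5t]
          have hm2 : pvMInv t (if pvOptLt p35f m1 then some p35f else m1) := by
            intro w hw
            by_cases hopt : pvOptLt p35f m1 = true
            · rw [if_pos hopt] at hw; cases hw; exact ⟨hp35f, hsmf⟩
            · rw [if_neg hopt] at hw; exact hminv1 w hw
          by_cases hak : a = k
          · subst hak
            have hdom := pvInner_dom t L h1t c b a hL htL t.natAbs 0 p5 m
              (by rw [hp]; ring) (Nat.zero_le _) p35f m1 hres
            have hm2L : ∃ w, (if pvOptLt p35f m1 then some p35f else m1) = some w ∧ w ≤ L := by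
              rcases hdom with hfL | ⟨v, hv, hvL⟩
              · by_cases hopt : pvOptLt p35f m1 = true
                · exact ⟨p35f, by rw [if_pos hopt], hfL⟩
                · obtain ⟨w, hw, hwle⟩ := pvOptLt_false (Bool.eq_false_iff.mpr hopt)
                  exact ⟨w, by rw [if_neg hopt]; exact hw, le_trans hwle hfL⟩
              · by_cases hopt : pvOptLt p35f m1 = true
                · exact ⟨p35f, by rw [if_pos hopt], le_trans (pvOptLt_true (hv ▸ hopt)).le hvL⟩
                · exact ⟨v, by rw [if_neg hopt]; exact hv, hvL⟩
            obtain ⟨w, hw, hwL⟩ := hm2L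
            have := pvOuter_le t h1t H3 fuel (p5 * 5) _ w (by omega) (pvSm_mul5 hsm) hm2 hw
            omega
          · exact ih (a + 1) (p5 * 5) _ (by rw [hp]; ring) (by omega) hm2
    · rw [if_neg hlt]
      have : p5 ≤ L := hp ▸ hp5L a ha
      cases m with
      | none => simpa using this
      | some v => simp only; split <;> omega

theorem pvLoopA_correct {t L : Int} (h7 : 7 ≤ t) (hLS : pvLS t L) :
    pvOuterA t t.natAbs 1 none = L := by
  obtain ⟨htL, hsmL, hmin⟩ := hLS
  have H3 : t ≤ 3 ^ t.natAbs := by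
    have := pv_natAbs_le_pow (t := t) 3 (by norm_num) (by omega)
    simpa using this
  have H5 : t ≤ 5 ^ t.natAbs := by
    have := pv_natAbs_le_pow (t := t) 5 (by norm_num) (by omega)
    simpa using this
  have hsound := pvOuter_sound t (by omega) H3 t.natAbs 1 none le_rfl ⟨0, 0, 0, by ring⟩
    (by simpa using H5) (pvMInv_none t)
  obtain ⟨c, b, k, hc⟩ := hsmL
  have hdom := pvOuter_dom t L (by omega) H3 c b k hc htL t.natAbs 0 1 none (by norm_num)
    (Nat.zero_le _) (pvMInv_none t)
  exact le_antisymm hdom (hmin _ hsound.1 hsound.2)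

-- ---- B : generate-and-filter ----
theorem pvPowers_mem_fwd (p bound : Int) :
    ∀ (fuel : Nat) (s : Nat) (y : Int), y ∈ pvPowers p bound fuel (p ^ s) →
      ∃ i : Nat, y = p ^ i ∧ y ≤ bound := by
  intro fuel
  induction fuel with
  | zero => intro s y h; cases h
  | succ fuel ih =>
    intro s y h
    unfold pvPowers at h
    by_cases hle : p ^ s ≤ bound
    · rw [if_pos hle] at h
      rcases List.mem_cons.mp h with rfl | h'
      · exact ⟨s, rfl, hle⟩
      · exact ih (s + 1) y (by rwa [← pow_succ] at h')
    · rw [if_neg hle] at h; cases h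

theorem pvPowers_mem_bwd {p : Int} (hp : 2 ≤ p) (bound : Int) :
    ∀ (fuel : Nat) (s i : Nat), s ≤ i → i - s < fuel → p ^ i ≤ bound →
      p ^ i ∈ pvPowers p bound fuel (p ^ s) := by
  intro fuel
  induction fuel with
  | zero => intro s i _ h _; omega
  | succ fuel ih =>
    intro s i hsi hfuel hle
    have hs : p ^ s ≤ bound :=
      le_trans (pow_le_pow_right₀ (by omega) hsi) hle
    unfold pvPowers
    rw [if_pos hs]
    rcases eq_or_lt_of_le hsi with rfl | hlt
    · exact List.mem_cons_self
    · refine List.mem_cons_of_mem _ ?_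
      rw [← pow_succ]
      exact ih (s + 1) i (by omega) (by omega) hle

theorem pvSmoothUpto_sm {bound n : Int} (h : n ∈ pvSmoothUpto bound) : pvSm n := by
  unfold pvSmoothUpto at h
  obtain ⟨p5, h5, h'⟩ := List.mem_flatMap.mp h
  obtain ⟨p3, h3, h''⟩ := List.mem_flatMap.mp h'
  obtain ⟨p2, h2, rfl⟩ := List.mem_map.mp h''
  obtain ⟨k, rfl, -⟩ := pvPowers_mem_fwd 5 bound _ 0 p5 (by simpa using h5)
  obtain ⟨j, rfl, -⟩ := pvPowers_mem_fwd 3 _ _ 0 p3 (by simpa using h3)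
  obtain ⟨i, rfl, -⟩ := pvPowers_mem_fwd 2 _ _ 0 p2 (by simpa using h2)
  exact ⟨i, j, k, by ring⟩

theorem pvSmoothUpto_complete {bound : Int} (hb : 1 ≤ bound) (i j k : Nat)
    (hn : 2 ^ i * 3 ^ j * 5 ^ k ≤ bound) :
    (2 ^ i * 3 ^ j * 5 ^ k : Int) ∈ pvSmoothUpto bound := by
  have h2i : (1:Int) ≤ 2 ^ i := one_le_pow₀ (by norm_num)
  have h3j : (1:Int) ≤ 3 ^ j := one_le_pow₀ (by norm_num)
  have h5k : (1:Int) ≤ 5 ^ k := one_le_pow₀ (by norm_num)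
  have h5pos : (0:Int) < 5 ^ k := by positivity
  have h35pos : (0:Int) < 5 ^ k * 3 ^ j := by positivity
  have h5b : (5:Int) ^ k ≤ bound := by nlinarith
  have h35b : (3:Int) ^ j * 5 ^ k ≤ bound := by nlinarith
  -- fuel bounds: an exponent e with p^e ≤ bound satisfies e ≤ bound.natAbs
  have hexp : ∀ (p : Int) (e : Nat), 2 ≤ p → p ^ e ≤ bound → e < bound.natAbs + 1 := by
    intro p e hp hpe
    have h1 : (e : Int) < 2 ^ e := by exact_mod_cast Nat.lt_two_pow_self
    have h2 : (2:Int) ^ e ≤ p ^ e := by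
      exact pow_le_pow_left₀ (by norm_num) hp e
    have : (e : Int) < bound := by omega
    omega
  unfold pvSmoothUpto
  refine List.mem_flatMap.mpr ⟨5 ^ k, ?_, ?_⟩
  · have := pvPowers_mem_bwd (p := 5) (by norm_num) bound (bound.natAbs + 1) 0 k
      (Nat.zero_le _) (by simpa using hexp 5 k (by norm_num) h5b) h5b
    simpa using this
  · refine List.mem_flatMap.mpr ⟨3 ^ j, ?_, ?_⟩
    · have hj : (3:Int) ^ j ≤ PySem.Int.floordiv bound (5 ^ k) :=
        (PySem.Int.le_floordiv_iff_mul_le h5pos).mpr (by nlinarith)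
      have := pvPowers_mem_bwd (p := 3) (by norm_num) (PySem.Int.floordiv bound (5 ^ k))
        (bound.natAbs + 1) 0 j (Nat.zero_le _)
        (by simpa using hexp 3 j (by norm_num) (by nlinarith)) hj
      simpa using this
    · refine List.mem_map.mpr ⟨2 ^ i, ?_, by ring⟩
      have hij : (2:Int) ^ i ≤ PySem.Int.floordiv bound (5 ^ k * 3 ^ j) :=
        (PySem.Int.le_floordiv_iff_mul_le h35pos).mpr (by nlinarith)
      have := pvPowers_mem_bwd (p := 2) (by norm_num) (PySem.Int.floordiv bound (5 ^ k * 3 ^ j))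
        (bound.natAbs + 1) 0 i (Nat.zero_le _)
        (by simpa using hexp 2 i (by norm_num) (by nlinarith)) hij
      simpa using this

theorem pvPow2Ge_spec (t : Int) :
    ∀ (fuel : Nat) (e : Nat), t ≤ 2 ^ e * 2 ^ fuel →
      ∃ c : Nat, pvPow2Ge t fuel (2 ^ e) = 2 ^ c ∧ t ≤ 2 ^ c := by
  intro fuel
  induction fuel with
  | zero => intro e h; exact ⟨e, rfl, by simpa using h⟩
  | succ fuel ih =>
    intro e h
    unfold pvPow2Ge
    by_cases hlt : (2:Int) ^ e < t
    · rw [if_pos hlt]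
      have h2 : (2:Int) * 2 ^ e = 2 ^ (e + 1) := by ring
      rw [h2]
      exact ih (e + 1) (by rw [pow_succ] at h ⊢; calc t ≤ 2 ^ e * (2 ^ fuel * 2) := h
        _ = 2 ^ (e + 1) * 2 ^ fuel := by ring)
    · rw [if_neg hlt]
      exact ⟨e, rfl, not_lt.mp hlt⟩

theorem pvAlt_correct {t L : Int} (h7 : 7 ≤ t) (hLS : pvLS t L) : next_fast_len_alt t = L := by
  obtain ⟨htL, hsmL, hmin⟩ := hLS
  unfold next_fast_len_alt
  rw [if_neg (by omega : ¬ t ≤ 6)]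
  have H2 : t ≤ 2 ^ t.natAbs := by
    have := pv_natAbs_le_pow (t := t) 2 (by norm_num) (by omega)
    simpa using this
  obtain ⟨c, hbeq, hbt⟩ := pvPow2Ge_spec t t.natAbs 0 (by simpa using H2)
  have hbeq' : pvPow2Ge t t.natAbs 1 = 2 ^ c := by simpa using hbeq
  rw [hbeq']
  show ((PySem.List.min? ((pvSmoothUpto (2 ^ c)).filter (fun n => decide (t ≤ n)))
      (fun n => n)).getD 0) = L
  have hb1 : (1:Int) ≤ 2 ^ c := one_le_pow₀ (by norm_num)
  have hLb : L ≤ 2 ^ c := hmin _ hbt ⟨c, 0, 0, by ring⟩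
  obtain ⟨i, j, k, hLdec⟩ := hsmL
  have hLmem : L ∈ pvSmoothUpto (2 ^ c) := by
    rw [hLdec]; exact pvSmoothUpto_complete hb1 i j k (by rw [← hLdec]; exact hLb)
  have hLfil : L ∈ (pvSmoothUpto (2 ^ c)).filter (fun n => decide (t ≤ n)) :=
    List.mem_filter.mpr ⟨hLmem, by simpa using htL⟩
  cases hmv : PySem.List.min? ((pvSmoothUpto (2 ^ c)).filter (fun n => decide (t ≤ n)))
      (fun n => n) with
  | none =>
    rw [PySem.List.min?_eq_none_iff] at hmv
    rw [hmv] at hLfil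
    cases hLfil
  | some mv =>
    have hmem := PySem.List.min?_mem hmv
    have hmvf := List.mem_filter.mp hmem
    have hmvt : t ≤ mv := by simpa using hmvf.2
    have hmvsm : pvSm mv := pvSmoothUpto_sm hmvf.1
    have h1 : L ≤ mv := hmin mv hmvt hmvsm
    have h2 : mv ≤ L := PySem.List.min?_isMin hmv L hLfil
    simpa using le_antisymm h2 h1

-- ===== VERDICT (by name: the statement is the Claim_ definition above) =====
set_option maxRecDepth 10000 in
theorem next_fast_len_spec : Claim_equal_next_fast_len := by
  intro t _
  unfold Spec_next_fast_len
  by_cases h6 : t ≤ 6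
  · unfold next_fast_len next_fast_len_alt
    rw [if_pos h6, if_pos h6]
  · obtain ⟨L, hLS⟩ := pvLS_exists (t := t) (by omega)
    have h7 : 7 ≤ t := by omega
    rw [pvAlt_correct h7 hLS]
    unfold next_fast_len
    rw [if_neg h6]
    by_cases hband : PySem.Int.band t (t - 1) = 0
    · rw [if_pos hband]
      exact le_antisymm hLS.1 (hLS.2.2 t le_rfl (pv_band_pow2 h7 hband))
    · rw [if_neg hband]
      have hlast : (PySem.List.pyGet? pvHams (-1)).getD 0 = 10000 := by decide
      rw [hlast]
      by_cases h10 : t ≤ 10000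
      · rw [if_pos h10]
        exact pv_table_correct h7 h10 hLS
      · rw [if_neg h10]
        exact pvLoopA_correct h7 hLS
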